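-- pv_equiv track=rewrite | github.com/TeamMsgExtractor/msg-extractor | extract_msg/custom_attachments/utils.py | tokenizeHtml
-- ===== SOURCE A (Python) =====
-- from typing import List
--
-- def tokenizeHtml(html : str) -> List[str]:
--     # Setup a few variables for state tracking.
--     inTag = False
--     # Used for tracking escapes starting with &. If your escape ends up at 100
--     # characters because it is missing the semicolon, we are going to throw an
--     # error.
--     inEscape = False
--     inString = False
--     # Only used when in string. Last character was a backslash.
--     isBackslash = False
--     # Tells which quote type we are in.
--     isDoubleQuote = False
--
--     tokens = []
--     currentToken = ''
--
--     # Finally, let's start breaking things up. Our rules are that if we start a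
--     # quote while in a tag, then we acknowledge it, otherwise it is treated as
--     # plain text.
--     for character in html:
--         # First we need to know our state, as our state determines what how we
--         # process a character.
--         if inTag:
--             currentToken += character
--             if inString:
--                 if character == '"' and isDoubleQuote:
--                     # If isBackslash then we stay in the quote, otherwise...
--                     isQuote = isBackslash
--                 elif character == "'" and not isDoubleQuote:
--                     # If isBackslash then we stay in the quote, otherwise...
--                     isQuote = isBackslash
--                 elif character == '\\':
--                     isBackslash = not isBackslash
--                 if character != '\\':
--                     isBackslash = False
--             else:
--                 if character == '>':
--                     inTag = False
--                     tokens.append(currentToken)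
--                     currentToken = ''
--         elif inEscape:
--             currentToken += character
--             if len(currentToken) > 99:
--                 raise ValueError('Found escape that was too long (is a ; missing?)')
--             if character == ';':
--                 tokens.append(currentToken)
--                 currentToken = ''
--                 inEscape = False
--         elif inString:
--             # This is an error. We should *never* be in a quote if we are not in
--             # a tag.
--             raise ValueError('Found to be inQuote when not in tag.')
--         else:
--             # We are currently processing plain text, so let's just handle.
--             if character == '&':
--                 if currentToken:
--                     tokens.append(currentToken)
--                 currentToken = character
--                 inEscape = True
--             elif character == '<':
--                 if currentToken:
--                     tokens.append(currentToken)
--                 currentToken = character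
--                 inTag = True
--                 inString = False
--             else:
--                 currentToken += character
--
--     if currentToken:
--         tokens.append(currentToken)
--
--     return tokens
-- ===== SOURCE B (Python) =====
-- from typing import List
--
-- def tokenizeHtml(html : str) -> List[str]:
--     # Delimiter-scanning tokenizer: jump between '&'/'<' with str.find instead
--     # of a char-by-char state machine.
--     tokens = []
--     n = len(html)
--     i = 0      # scan position
--     start = 0  # start of the pending plain-text run
--     while i < n:
--         c = html[i]
--         if c == '&':
--             if start < i:
--                 tokens.append(html[start:i])
--             # ';' may sit at most 98 characters after the '&' (escape <= 99 chars).
--             j = html.find(';', i + 1, i + 99)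
--             if j == -1:
--                 if i + 99 < n:
--                     raise ValueError('Found escape that was too long (is a ; missing?)')
--                 tokens.append(html[i:])
--                 return tokens
--             tokens.append(html[i:j + 1])
--             i = j + 1
--             start = i
--         elif c == '<':
--             if start < i:
--                 tokens.append(html[start:i])
--             j = html.find('>', i + 1)
--             if j == -1:
--                 tokens.append(html[i:])
--                 return tokens
--             tokens.append(html[i:j + 1])
--             i = j + 1
--             start = i
--         else:
--             i += 1
--     if start < n:
--         tokens.append(html[start:])
--     return tokens
-- ===== Notes on version B (the rewrite author's own statement) =====
-- stated objective: alternative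
-- what changed: Replaced A's char-by-char five-flag state machine by a delimiter-jumping scanner that finds the next '&'/'<' boundary with str.find and emits whole slices, dropping the dead in-string/backslash logic.
import Mathlib
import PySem

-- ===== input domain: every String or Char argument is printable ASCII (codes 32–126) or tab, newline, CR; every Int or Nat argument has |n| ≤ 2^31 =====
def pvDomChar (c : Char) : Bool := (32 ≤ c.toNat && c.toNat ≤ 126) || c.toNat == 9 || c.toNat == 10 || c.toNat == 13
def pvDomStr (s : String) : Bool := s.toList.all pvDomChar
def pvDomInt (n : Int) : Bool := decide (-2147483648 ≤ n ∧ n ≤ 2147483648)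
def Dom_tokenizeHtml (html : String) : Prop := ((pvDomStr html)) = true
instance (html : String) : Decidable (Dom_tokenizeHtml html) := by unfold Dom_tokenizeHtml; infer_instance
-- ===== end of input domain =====

-- B replaces A's char-by-char state machine by a delimiter-jumping scanner (find the
-- next '&' / '<' / terminator and emit whole slices); objective: alternative/idiomatic.

-- ===== PORT A =====
-- A's loop state: the five booleans, the token list, the current token, and an
-- error flag (`err` models the two `raise ValueError` statements; once set the
-- fold is frozen — those inputs lie outside Pre_tokenizeHtml).
structure AState where
  inTag : Bool
  inEscape : Bool
  inString : Bool
  isBackslash : Bool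
  isDoubleQuote : Bool
  tokens : List String
  cur : List Char
  err : Bool
  deriving Repr

-- one iteration of A's `for character in html` body
def aStep (st : AState) (c : Char) : AState :=
  if st.err then st
  else if st.inTag then
    let cur := st.cur ++ [c]
    if st.inString then
      -- (dead branch in practice: inString is never set to True; `isQuote` is
      -- assigned but never read, so it is omitted)
      let bs := if c = '\\' then !st.isBackslash else st.isBackslash
      let bs := if c ≠ '\\' then false else bs
      { st with cur := cur, isBackslash := bs }
    else
      if c = '>' then
        { st with inTag := false, tokens := st.tokens ++ [String.ofList cur], cur := [] }
      else { st with cur := cur }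
  else if st.inEscape then
    let cur := st.cur ++ [c]
    if cur.length > 99 then { st with cur := cur, err := true }  -- raise ValueError
    else if c = ';' then
      { st with inEscape := false, tokens := st.tokens ++ [String.ofList cur], cur := [] }
    else { st with cur := cur }
  else if st.inString then { st with err := true }  -- raise ValueError (unreachable)
  else
    if c = '&' then
      let tokens := if st.cur.isEmpty then st.tokens else st.tokens ++ [String.ofList st.cur]
      { st with inEscape := true, tokens := tokens, cur := [c] }
    else if c = '<' then
      let tokens := if st.cur.isEmpty then st.tokens else st.tokens ++ [String.ofList st.cur]
      { st with inTag := true, inString := false, tokens := tokens, cur := [c] }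
    else { st with cur := st.cur ++ [c] }

def aFinish (st : AState) : List String :=
  if st.err then st.tokens
  else if st.cur.isEmpty then st.tokens else st.tokens ++ [String.ofList st.cur]

def tokenizeHtml (html : String) : List String :=
  aFinish (html.toList.foldl aStep
    ⟨false, false, false, false, false, [], [], false⟩)

-- ===== PORT B =====
-- B helper: `html.find('>', i+1)` / the slice up to and including it, as a list
-- scan returning (token-part, rest); none = not found.
def takeThrough (d : Char) : List Char → Option (List Char × List Char)
  | [] => none
  | x :: xs =>
    if x = d then some ([x], xs)
    else match takeThrough d xs with
      | none => none
      | some (t, r) => some (x :: t, r)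

-- B helper: bounded search for ';' (the `html.find(';', i+1, i+99)` window):
-- found within `fuel` chars, string ended first, or window exhausted (A raises).
inductive EscRes where
  | found (t r : List Char)
  | eof (t : List Char)
  | tooLong
  deriving Repr

def escScan : Nat → List Char → EscRes
  | _, [] => .eof []
  | 0, _ :: _ => .tooLong
  | Nat.succ k, x :: xs =>
    if x = ';' then .found [x] xs
    else match escScan k xs with
      | .found t r => .found (x :: t) r
      | .eof t => .eof (x :: t)
      | .tooLong => .tooLong

theorem takeThrough_rest_le (d : Char) (cs t r : List Char)
    (h : takeThrough d cs = some (t, r)) : r.length ≤ cs.length := by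
  induction cs generalizing t r with
  | nil => simp [takeThrough] at h
  | cons x xs ih =>
    simp only [takeThrough] at h
    split at h
    · simp_all
    · cases hx : takeThrough d xs with
      | none => rw [hx] at h; simp at h
      | some p =>
        rw [hx] at h
        obtain ⟨t', r'⟩ := p
        simp at h
        have := ih t' r' hx
        simp [← h.2]; omega

theorem escScan_found_le (f : Nat) (cs t r : List Char)
    (h : escScan f cs = .found t r) : r.length ≤ cs.length := by
  induction cs generalizing f t r with
  | nil => cases f <;> simp [escScan] at h
  | cons x xs ih =>
    cases f with
    | zero => simp [escScan] at h
    | succ k =>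
      simp only [escScan] at h
      split at h
      · simp_all
      · cases hx : escScan k xs with
        | found t' r' =>
          rw [hx] at h; simp at h
          have := ih k t' r' hx
          simp [← h.2]; omega
        | eof t' => rw [hx] at h; simp at h
        | tooLong => rw [hx] at h; simp at h

-- B's main scan: `run` is the pending plain-text slice (html[start:i]).
def bLoop : List Char → List Char → List String
  | [], run => if run.isEmpty then [] else [String.ofList run]
  | c :: xs, run =>
    if c = '&' then
      let pre := if run.isEmpty then [] else [String.ofList run]
      match h : escScan 98 xs with
      | .found t r => pre ++ String.ofList ('&' :: t) :: bLoop r []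
      | .eof t => pre ++ [String.ofList ('&' :: t)]
      | .tooLong => pre  -- Source B raises ValueError here; outside Pre_tokenizeHtml
    else if c = '<' then
      let pre := if run.isEmpty then [] else [String.ofList run]
      match h : takeThrough '>' xs with
      | some (t, r) => pre ++ String.ofList ('<' :: t) :: bLoop r []
      | none => pre ++ [String.ofList ('<' :: xs)]
    else bLoop xs (run ++ [c])
termination_by cs _ => cs.length
decreasing_by
  · have := escScan_found_le 98 xs t r h; simp; omega
  · have := takeThrough_rest_le '>' xs t r h; simp; omega
  · simp

def tokenizeHtml_alt (html : String) : List String :=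
  bLoop html.toList []

-- ===== PRECONDITION & SPEC =====
-- Pre_ excludes exactly the inputs on which A raises ValueError: an escape
-- ('&' hit outside a tag) that runs for 100 characters without a terminating
-- ';' among its first 99. Source B raises the same ValueError there.
inductive PMode where
  | text
  | tag
  | esc (fuel : Nat)

def preOk : List Char → PMode → Bool
  | [], _ => true
  | c :: cs, .text =>
    if c = '&' then preOk cs (.esc 98)
    else if c = '<' then preOk cs .tag
    else preOk cs .text
  | c :: cs, .tag => if c = '>' then preOk cs .text else preOk cs .tag
  | c :: cs, .esc f =>
    match f with
    | 0 => false
    | Nat.succ k => if c = ';' then preOk cs .text else preOk cs (.esc k)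

def Pre_tokenizeHtml (html : String) : Prop := preOk html.toList .text = true
instance (html : String) : Decidable (Pre_tokenizeHtml html) := by
  unfold Pre_tokenizeHtml; infer_instance

def pvWitness_tokenizeHtml : String := "a <b href=\"x\">&amp; c</b>"

def Spec_tokenizeHtml (html : String) (out : List String) : Prop := out = tokenizeHtml_alt html
instance (html : String) (out : List String) : Decidable (Spec_tokenizeHtml html out) := by unfold Spec_tokenizeHtml; infer_instance

-- ===== CLAIM (what is proved, stated in full; the proofs are below) =====
def Claim_equal_tokenizeHtml : Prop := ∀ (html : String), Dom_tokenizeHtml html → Pre_tokenizeHtml html → Spec_tokenizeHtml html (tokenizeHtml html)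

-- ===== LEMMAS AND PROOFS =====

-- state abbreviations for A's three live modes (all dead booleans false)
def textSt (tokens : List String) (run : List Char) : AState :=
  ⟨false, false, false, false, false, tokens, run, false⟩
def tagSt (tokens : List String) (cur : List Char) : AState :=
  ⟨true, false, false, false, false, tokens, cur, false⟩
def escSt (tokens : List String) (cur : List Char) : AState :=
  ⟨false, true, false, false, false, tokens, cur, false⟩
def flushTok (tokens : List String) (run : List Char) : List String :=
  if run.isEmpty then tokens else tokens ++ [String.ofList run]

-- one-step behaviour of aStep on each live mode
theorem aStep_text (tokens : List String) (run : List Char) (c : Char) :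
    aStep (textSt tokens run) c =
      if c = '&' then escSt (flushTok tokens run) ['&']
      else if c = '<' then tagSt (flushTok tokens run) ['<']
      else textSt tokens (run ++ [c]) := by
  by_cases h1 : c = '&'
  · simp [aStep, textSt, escSt, flushTok, h1]
  · by_cases h2 : c = '<' <;> simp [aStep, textSt, escSt, tagSt, flushTok, h1, h2]

theorem aStep_tag (tokens : List String) (cur : List Char) (c : Char) :
    aStep (tagSt tokens cur) c =
      if c = '>' then textSt (tokens ++ [String.ofList (cur ++ [c])]) []
      else tagSt tokens (cur ++ [c]) := by
  by_cases h : c = '>' <;> simp [aStep, tagSt, textSt, h]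

theorem aStep_esc (tokens : List String) (cur : List Char) (c : Char)
    (hlen : cur.length + 1 ≤ 99) :
    aStep (escSt tokens cur) c =
      if c = ';' then textSt (tokens ++ [String.ofList (cur ++ [c])]) []
      else escSt tokens (cur ++ [c]) := by
  have hl : cur.length < 99 := by omega
  by_cases h : c = ';' <;> simp [aStep, escSt, textSt, h, hl]

-- A marches through a tag exactly as takeThrough does
theorem tagRun_found (cs : List Char) : ∀ (cur t r : List Char) (tokens : List String),
    takeThrough '>' cs = some (t, r) →
    cs.foldl aStep (tagSt tokens cur) =
      r.foldl aStep (textSt (tokens ++ [String.ofList (cur ++ t)]) []) := by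
  induction cs with
  | nil => intro cur t r tokens h; simp [takeThrough] at h
  | cons x xs ih =>
    intro cur t r tokens h
    simp only [takeThrough] at h
    rw [List.foldl_cons, aStep_tag]
    by_cases hx : x = '>'
    · simp [hx] at h
      obtain ⟨ht, hr⟩ := h
      subst ht hr hx
      simp
    · simp [hx] at h
      cases hrec : takeThrough '>' xs with
      | none => rw [hrec] at h; simp at h
      | some p =>
        obtain ⟨t', r'⟩ := p
        rw [hrec] at h; simp at h
        obtain ⟨ht, hr⟩ := h
        subst hr
        rw [if_neg hx, ih (cur ++ [x]) t' r' tokens hrec, ← ht]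
        simp

theorem tagRun_none (cs : List Char) : ∀ (cur : List Char) (tokens : List String),
    takeThrough '>' cs = none →
    cs.foldl aStep (tagSt tokens cur) = tagSt tokens (cur ++ cs) := by
  induction cs with
  | nil => intro cur tokens _; simp
  | cons x xs ih =>
    intro cur tokens h
    simp only [takeThrough] at h
    rw [List.foldl_cons, aStep_tag]
    by_cases hx : x = '>'
    · simp [hx] at h
    · simp [hx] at h
      cases hrec : takeThrough '>' xs with
      | some p => rw [hrec] at h; cases p; simp at h
      | none =>
        rw [if_neg hx, ih (cur ++ [x]) tokens hrec]
        simp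

-- A marches through an escape exactly as escScan does
theorem escRun_found (cs : List Char) : ∀ (f : Nat) (cur t r : List Char) (tokens : List String),
    cur.length + f = 99 →
    escScan f cs = .found t r →
    cs.foldl aStep (escSt tokens cur) =
      r.foldl aStep (textSt (tokens ++ [String.ofList (cur ++ t)]) []) := by
  induction cs with
  | nil => intro f cur t r tokens _ h; cases f <;> simp [escScan] at h
  | cons x xs ih =>
    intro f cur t r tokens hlen h
    cases f with
    | zero => simp [escScan] at h
    | succ k =>
      rw [List.foldl_cons, aStep_esc tokens cur x (by omega)]
      simp only [escScan] at h
      by_cases hx : x = ';'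
      · simp [hx] at h
        obtain ⟨ht, hr⟩ := h
        subst ht hr hx
        simp
      · simp [hx] at h
        cases hrec : escScan k xs with
        | found t' r' =>
          rw [hrec] at h; simp at h
          obtain ⟨ht, hr⟩ := h
          subst hr
          rw [if_neg hx, ih k (cur ++ [x]) t' r' tokens (by simp; omega) hrec, ← ht]
          simp
        | eof t' => rw [hrec] at h; simp at h
        | tooLong => rw [hrec] at h; simp at h

theorem escRun_eof (cs : List Char) : ∀ (f : Nat) (cur t : List Char) (tokens : List String),
    cur.length + f = 99 →
    escScan f cs = .eof t →
    cs.foldl aStep (escSt tokens cur) = escSt tokens (cur ++ t) := by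
  induction cs with
  | nil =>
    intro f cur t tokens _ h
    cases f <;> simp [escScan] at h <;> (subst h; simp [escSt])
  | cons x xs ih =>
    intro f cur t tokens hlen h
    cases f with
    | zero => simp [escScan] at h
    | succ k =>
      rw [List.foldl_cons, aStep_esc tokens cur x (by omega)]
      simp only [escScan] at h
      by_cases hx : x = ';'
      · simp [hx] at h
      · simp [hx] at h
        cases hrec : escScan k xs with
        | found t' r' => rw [hrec] at h; simp at h
        | tooLong => rw [hrec] at h; simp at h
        | eof t' =>
          rw [hrec] at h; simp at h
          rw [if_neg hx, ih k (cur ++ [x]) t' tokens (by simp; omega) hrec, ← h]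
          simp

-- preOk carries the scan results back into text mode
theorem preOk_esc_found (cs : List Char) : ∀ (f : Nat) (t r : List Char),
    preOk cs (.esc f) = true → escScan f cs = .found t r → preOk r .text = true := by
  induction cs with
  | nil => intro f t r _ h; cases f <;> simp [escScan] at h
  | cons x xs ih =>
    intro f t r hpre h
    cases f with
    | zero => simp [preOk] at hpre
    | succ k =>
      simp only [preOk, escScan] at hpre h
      by_cases hx : x = ';'
      · simp [hx] at h hpre
        rw [← h.2]; exact hpre
      · simp [hx] at h hpre
        cases hrec : escScan k xs with
        | found t' r' =>
          rw [hrec] at h; simp at h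
          rw [← h.2]; exact ih k t' r' hpre hrec
        | eof t' => rw [hrec] at h; simp at h
        | tooLong => rw [hrec] at h; simp at h

theorem preOk_esc_not_tooLong (cs : List Char) : ∀ (f : Nat),
    preOk cs (.esc f) = true → escScan f cs ≠ .tooLong := by
  induction cs with
  | nil => intro f _ h; cases f <;> simp [escScan] at h
  | cons x xs ih =>
    intro f hpre h
    cases f with
    | zero => simp [preOk] at hpre
    | succ k =>
      simp only [preOk, escScan] at hpre h
      by_cases hx : x = ';'
      · simp [hx] at h
      · simp [hx] at h hpre
        cases hrec : escScan k xs with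
        | found t' r' => rw [hrec] at h; simp at h
        | eof t' => rw [hrec] at h; simp at h
        | tooLong => exact ih k hpre hrec

theorem preOk_tag_found (cs : List Char) : ∀ (t r : List Char),
    preOk cs .tag = true → takeThrough '>' cs = some (t, r) → preOk r .text = true := by
  induction cs with
  | nil => intro t r _ h; simp [takeThrough] at h
  | cons x xs ih =>
    intro t r hpre h
    simp only [preOk, takeThrough] at hpre h
    by_cases hx : x = '>'
    · simp [hx] at h hpre
      rw [← h.2]; exact hpre
    · simp [hx] at h hpre
      cases hrec : takeThrough '>' xs with
      | none => rw [hrec] at h; simp at h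
      | some p =>
        obtain ⟨t', r'⟩ := p
        rw [hrec] at h; simp at h
        rw [← h.2]; exact ih t' r' hpre hrec

-- the main correspondence: A's fold from a text state equals B's scanner
theorem mainEq (n : Nat) : ∀ (cs : List Char), cs.length ≤ n →
    ∀ (run : List Char) (tokens : List String), preOk cs .text = true →
    aFinish (cs.foldl aStep (textSt tokens run)) = tokens ++ bLoop cs run := by
  induction n with
  | zero =>
    intro cs hlen run tokens _
    have : cs = [] := by cases cs <;> simp_all
    subst this
    by_cases hr : run.isEmpty <;> simp [aFinish, textSt, bLoop, hr]
  | succ n ih =>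
    intro cs hlen run tokens hpre
    cases cs with
    | nil => by_cases hr : run.isEmpty <;> simp [aFinish, textSt, bLoop, hr]
    | cons c cs =>
      have hlen' : cs.length ≤ n := by simp at hlen; omega
      rw [List.foldl_cons, aStep_text]
      by_cases hamp : c = '&'
      · subst hamp
        simp only [reduceIte]
        have hpre' : preOk cs (.esc 98) = true := by simpa [preOk] using hpre
        cases hscan : escScan 98 cs with
        | found t r =>
          rw [escRun_found cs 98 ['&'] t r _ (by simp) hscan]
          have hrlen : r.length ≤ n := le_trans (escScan_found_le 98 cs t r hscan) hlen'
          rw [ih r hrlen [] _ (preOk_esc_found cs 98 t r hpre' hscan)]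
          rw [bLoop]
          simp only [reduceIte, hscan]
          by_cases hr : run.isEmpty <;> simp [flushTok, hr] <;> split <;> simp_all
        | eof t =>
          rw [escRun_eof cs 98 ['&'] t _ (by simp) hscan]
          rw [bLoop]
          simp only [reduceIte, hscan]
          by_cases hr : run.isEmpty <;> simp [aFinish, escSt, flushTok, hr] <;> split <;> simp_all
        | tooLong => exact absurd hscan (preOk_esc_not_tooLong cs 98 hpre')
      · by_cases hlt : c = '<'
        · subst hlt
          simp only [if_neg hamp, reduceIte]
          have hpre' : preOk cs .tag = true := by simpa [preOk, hamp] using hpre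
          cases hscan : takeThrough '>' cs with
          | some p =>
            obtain ⟨t, r⟩ := p
            rw [tagRun_found cs ['<'] t r _ hscan]
            have hrlen : r.length ≤ n := le_trans (takeThrough_rest_le '>' cs t r hscan) hlen'
            rw [ih r hrlen [] _ (preOk_tag_found cs t r hpre' hscan)]
            rw [bLoop]
            simp only [if_neg hamp, reduceIte, hscan]
            by_cases hr : run.isEmpty <;> simp [flushTok, hr] <;> split <;> simp_all
          | none =>
            rw [tagRun_none cs ['<'] _ hscan]
            rw [bLoop]
            simp only [if_neg hamp, reduceIte, hscan]
            by_cases hr : run.isEmpty <;> simp [aFinish, tagSt, flushTok, hr] <;> split <;> simp_all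
        · rw [if_neg hamp, if_neg hlt]
          have hpre' : preOk cs .text = true := by simpa [preOk, hamp, hlt] using hpre
          rw [ih cs hlen' (run ++ [c]) tokens hpre']
          rw [bLoop]
          simp [hamp, hlt]

-- ===== VERDICT (by name: the statement is the Claim_ definition above) =====
theorem tokenizeHtml_spec : Claim_equal_tokenizeHtml := by
  intro html _ hpre
  unfold Spec_tokenizeHtml tokenizeHtml tokenizeHtml_alt
  have := mainEq html.toList.length html.toList le_rfl [] [] hpre
  simpa [textSt] using this
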